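-- pv_equiv track=rewrite | github.com/PranavNagrecha/AwesomeSalesforceSkills | skills/apex/apex-enum-patterns/scripts/check_apex_enum_patterns.py | _surrounding_try
-- ===== SOURCE A (Python) =====
-- def _surrounding_try(text: str, pos: int) -> bool:
--     """Heuristic: is `pos` inside a try { ... } block at any depth?"""
--     # Walk backwards to find the nearest unbalanced `{` and check if the
--     # token before it is `try`.
--     depth = 0
--     i = pos
--     while i > 0:
--         c = text[i]
--         if c == "}":
--             depth += 1
--         elif c == "{":
--             if depth == 0:
--                 # Look back from i for whitespace then `try`
--                 j = i - 1
--                 while j > 0 and text[j] in " \t\r\n":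
--                     j -= 1
--                 # Check tail of the prefix for "try"
--                 if text[max(0, j - 3): j + 1].endswith("try"):
--                     return True
--                 i -= 1
--                 continue
--             depth -= 1
--         i -= 1
--     return False
-- ===== SOURCE B (Python) =====
-- def _surrounding_try(text: str, pos: int) -> bool:
--     """Forward scan: build the stack of currently-open braces (each flagged
--     try or not), then ask whether any open brace is a try-brace."""
--     stack = []
--     for i in range(1, pos + 1):
--         c = text[i]
--         if c == "{":
--             j = i - 1
--             while j > 0 and text[j] in " \t\r\n":
--                 j -= 1
--             stack.append(text[max(0, j - 3): j + 1].endswith("try"))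
--         elif c == "}":
--             if stack:
--                 stack.pop()
--     return any(stack)
-- ===== Notes on version B (the rewrite author's own statement) =====
-- stated objective: alternative
-- what changed: Replaced A's backward walk with an unmatched-close-brace depth counter and early return by a single forward pass that maintains an explicit stack of booleans (one per currently-open brace, flagged try/non-try) and finishes with any(stack).
import Mathlib
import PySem

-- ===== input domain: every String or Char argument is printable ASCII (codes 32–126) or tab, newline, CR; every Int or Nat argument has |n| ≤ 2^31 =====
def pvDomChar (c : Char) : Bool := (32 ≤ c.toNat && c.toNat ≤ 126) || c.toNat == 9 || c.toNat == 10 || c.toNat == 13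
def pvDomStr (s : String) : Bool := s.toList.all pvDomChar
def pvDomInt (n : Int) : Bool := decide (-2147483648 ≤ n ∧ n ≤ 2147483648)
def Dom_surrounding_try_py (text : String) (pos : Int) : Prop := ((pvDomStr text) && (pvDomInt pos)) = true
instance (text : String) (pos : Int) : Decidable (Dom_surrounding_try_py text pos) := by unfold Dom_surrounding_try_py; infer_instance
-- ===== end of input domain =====

-- B replaces A's backward unmatched-brace walk by a forward pass that keeps a stack of
-- try-flags for the open braces and returns any(stack); equal return values on Pre_.

-- ===== PORT A =====
-- shared inner code of both Pythons: j = i-1; while j > 0 and text[j] in " \t\r\n": j -= 1;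
-- then text[max(0, j-3) : j+1].endswith("try").  Both bounds are nonnegative, so the Python
-- slice is exactly (take (j+1)).drop (j-3) in Nat arithmetic (max(0, j-3) is Nat-subtraction).
def pvWs (c : Char) : Bool := c == ' ' || c == '\t' || c == '\r' || c == '\n'

def pvSkipWs (l : List Char) : Nat → Nat
  | 0 => 0
  | j + 1 => if pvWs (l.getD (j + 1) ' ') then pvSkipWs l j else j + 1

def pvTryBefore (l : List Char) (i : Nat) : Bool :=
  let j := pvSkipWs l (i - 1)
  ['t', 'r', 'y'].isSuffixOf ((l.take (j + 1)).drop (j - 3))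

-- A's loop: while i > 0, read text[i] (always in range under Pre_; getD's default is
-- never hit there), '}' raises depth, '{' at depth 0 tests the preceding token.
def pvGoA (l : List Char) : Nat → Nat → Bool
  | 0, _ => false
  | i + 1, depth =>
    let c := l.getD (i + 1) ' '
    if c == '}' then pvGoA l i (depth + 1)
    else if c == '{' then
      if depth == 0 then
        (if pvTryBefore l (i + 1) then true else pvGoA l i 0)
      else pvGoA l i (depth - 1)
    else pvGoA l i depth

-- i = pos, loop guarded by i > 0: for pos ≤ 0 Python returns False, and pos.toNat = 0 gives false.
def surrounding_try_py (text : String) (pos : Int) : Bool :=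
  pvGoA text.toList pos.toNat 0

-- ===== PORT B =====
-- one forward step of Source B's loop body (indices drawn from range(1, pos+1) are ≥ 1, so toNat is exact)
def pvStep (l : List Char) (st : List Bool) (i : Int) : List Bool :=
  let c := l.getD i.toNat ' '
  if c == '{' then st ++ [pvTryBefore l i.toNat]
  else if c == '}' then (if st.isEmpty then st else st.dropLast)
  else st

def surrounding_try_py_alt (text : String) (pos : Int) : Bool :=
  ((PySem.List.pyRange 1 (pos + 1) 1).foldl (pvStep text.toList) []).any id

-- ===== PRECONDITION & SPEC =====
-- Pre_ excludes exactly the inputs where Python A raises IndexError (pos > 0 and pos ≥ len(text));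
-- B raises there too.
def Pre_surrounding_try_py (text : String) (pos : Int) : Prop :=
  pos ≤ 0 ∨ pos < (text.toList.length : Int)
instance (text : String) (pos : Int) : Decidable (Pre_surrounding_try_py text pos) := by
  unfold Pre_surrounding_try_py; infer_instance

def pvWitness_surrounding_try_py : String × Int := ("try { x }", 5)

def Spec_surrounding_try_py (text : String) (pos : Int) (out : Bool) : Prop :=
  out = surrounding_try_py_alt text pos
instance (text : String) (pos : Int) (out : Bool) : Decidable (Spec_surrounding_try_py text pos out) := by
  unfold Spec_surrounding_try_py; infer_instance

-- ===== CLAIM (what is proved, stated in full; the proofs are below) =====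
def Claim_equal_surrounding_try_py : Prop := ∀ (text : String) (pos : Int), Dom_surrounding_try_py text pos → Pre_surrounding_try_py text pos → Spec_surrounding_try_py text pos (surrounding_try_py text pos)

-- ===== LEMMAS AND PROOFS =====

-- the stack after Source B has processed indices 1..k
def pvS (l : List Char) : Nat → List Bool
  | 0 => []
  | k + 1 => pvStep l (pvS l k) ((k : Int) + 1)

lemma pvFoldl_eq_S (l : List Char) (n : Nat) :
    (PySem.List.pyRange 1 ((n : Int) + 1) 1).foldl (pvStep l) [] = pvS l n := by
  induction n with
  | zero => simp [PySem.List.pyRange_one_eq_nil, pvS]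
  | succ n ih =>
    have h : ((1 : Int) ≤ (n : Int) + 1) := by omega
    rw [show ((n + 1 : Nat) : Int) + 1 = ((n : Int) + 1) + 1 by push_cast; ring,
        PySem.List.pyRange_one_succ_right h, List.foldl_append]
    simp [ih, pvS]

-- popping then dropping d of the remaining top equals dropping d+1 of the top
lemma pvPopTake (st : List Bool) (d : Nat) :
    (if st = [] then st else st.dropLast).take ((if st = [] then st else st.dropLast).length - d)
      = st.take (st.length - (d + 1)) := by
  rcases st with _ | ⟨x, xs⟩
  · simp
  · rw [if_neg (by simp), List.dropLast_eq_take, List.take_take]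
    congr 1
    simp

-- invariant: the backward walk at index k with pending depth d sees exactly the
-- forward stack after k with its top d entries discarded
lemma pvMain (l : List Char) (k : Nat) :
    ∀ d, pvGoA l k d = ((pvS l k).take ((pvS l k).length - d)).any id := by
  induction k with
  | zero => intro d; simp [pvGoA, pvS]
  | succ k ih =>
    intro d
    have htn : (((k : Int) + 1)).toNat = k + 1 := by omega
    by_cases hb : l[k + 1]?.getD ' ' = '}'
    · have hA : pvGoA l (k + 1) d = pvGoA l k (d + 1) := by simp [pvGoA, hb]
      have hS : pvS l (k + 1) = if pvS l k = [] then pvS l k else (pvS l k).dropLast := by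
        simp [pvS, pvStep, htn, hb]
      rw [hA, ih (d + 1), hS, pvPopTake]
    · by_cases ho : l[k + 1]?.getD ' ' = '{'
      · have hS : pvS l (k + 1) = pvS l k ++ [pvTryBefore l (k + 1)] := by
          simp [pvS, pvStep, htn, ho]
        match d with
        | 0 =>
          have hA : pvGoA l (k + 1) 0 = (pvTryBefore l (k + 1) || pvGoA l k 0) := by
            simp [pvGoA, ho]
          rw [hA, hS, ih 0]
          simp only [Nat.sub_zero, List.take_length, List.any_append, List.any_cons,
            List.any_nil, id, Bool.or_false]
          cases pvTryBefore l (k + 1) <;> simp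
        | d' + 1 =>
          have hA : pvGoA l (k + 1) (d' + 1) = pvGoA l k d' := by
            simp [pvGoA, ho]
          rw [hA, hS, ih d']
          have hlen : (pvS l k ++ [pvTryBefore l (k + 1)]).length - (d' + 1)
              = (pvS l k).length - d' := by simp
          rw [hlen, List.take_append_of_le_length (by omega)]
      · have hA : pvGoA l (k + 1) d = pvGoA l k d := by simp [pvGoA, hb, ho]
        have hS : pvS l (k + 1) = pvS l k := by simp [pvS, pvStep, htn, hb, ho]
        rw [hA, hS, ih d]

-- ===== VERDICT (by name: the statement is the Claim_ definition above) =====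
theorem surrounding_try_py_spec : Claim_equal_surrounding_try_py := by
  intro text pos _hdom _hpre
  unfold Spec_surrounding_try_py surrounding_try_py surrounding_try_py_alt
  by_cases h : pos ≤ 0
  · rw [PySem.List.pyRange_one_eq_nil (by omega), Int.toNat_of_nonpos h]
    simp [pvGoA]
  · obtain ⟨n, rfl⟩ : ∃ n : Nat, pos = (n : Int) := ⟨pos.toNat, by omega⟩
    rw [pvFoldl_eq_S, Int.toNat_natCast, pvMain]
    simp
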